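-- pv_equiv track=rewrite | github.com/nlelyavin/call-tools | task2/main.py | get_stat_about_employees
-- ===== SOURCE A (Python) =====
-- from typing import List, Dict
--
-- SEPARATOR = ' '
--
-- def _extract_info_about_employee(employee: str) -> (str, str):
--     """Получение статистики о работнике из полученной строки"""
--
--     split_employee = employee.rpartition(SEPARATOR)
--
--     name = split_employee[0]
--     work_hours = split_employee[2]
--
--     return name, work_hours
--
-- def _validate_employee_stat(name: str, work_hours: str) -> bool:
--     """Валидация данных о работнике"""
--
--     return name and work_hours and work_hours.isnumeric()
--
-- def get_stat_about_employees(employees: List[str]) -> Dict[str, list]: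
--     """Получение статистики о работниках
--
--
--     :return: {'name': [1, 2 ,10]}
--     """
--
--     employees_stat = dict()
--
--     for employee in employees:
--         name, work_hours = _extract_info_about_employee(employee=employee)
--
--         if not (_validate_employee_stat(name=name, work_hours=work_hours)):
--             continue
--
--         work_hours = int(work_hours)
--         if name in employees_stat:
--             employees_stat[name].append(work_hours)
--         else:
--             employees_stat[name] = [work_hours]
--
--     return employees_stat
-- ===== SOURCE B (Python) =====
-- from typing import List, Dict, Optional, Tuple
--
-- SEPARATOR = ' '
--
-- def _parse(employee: str) -> Optional[Tuple[str, int]]: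
--     """Parse one line into (name, hours); None if invalid."""
--     name, _, hours = employee.rpartition(SEPARATOR)
--     if name and hours and hours.isnumeric():
--         return name, int(hours)
--     return None
--
-- def get_stat_about_employees(employees: List[str]) -> Dict[str, list]:
--     pairs = [p for e in employees if (p := _parse(e)) is not None]
--     names = dict.fromkeys(n for n, _ in pairs)
--     return {n: [h for m, h in pairs if m == n] for n in names}
-- ===== Notes on version B (the rewrite author's own statement) =====
-- stated objective: simpler
-- what changed: B splits the work into a single parse pass producing (name, hours) pairs and a grouping step that maps each first-occurrence name to the filtered list of its hours, instead of A's per-line dict mutation with an in/append/insert branch.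
import Mathlib
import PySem

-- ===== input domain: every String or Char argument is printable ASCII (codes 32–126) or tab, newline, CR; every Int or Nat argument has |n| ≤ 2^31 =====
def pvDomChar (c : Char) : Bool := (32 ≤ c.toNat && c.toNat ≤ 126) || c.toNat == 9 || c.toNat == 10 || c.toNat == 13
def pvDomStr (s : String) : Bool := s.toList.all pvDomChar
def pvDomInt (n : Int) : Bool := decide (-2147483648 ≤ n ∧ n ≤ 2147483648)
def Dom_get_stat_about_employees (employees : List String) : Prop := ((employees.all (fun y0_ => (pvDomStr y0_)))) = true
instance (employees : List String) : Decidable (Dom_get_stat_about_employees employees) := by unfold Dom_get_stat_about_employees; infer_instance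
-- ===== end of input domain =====

-- B parses each line once into (name, hours) pairs, then groups by first-occurrence name
-- in two comprehension-style passes instead of A's incremental dict mutation (objective: simpler).


-- ===== PORT A =====
-- employee.rpartition(' '): (text before the LAST ' ', text after); no ' ' → ('', employee)
def pvExtractInfo (employee : List Char) : List Char × List Char :=
  let i := PySem.Chars.rfind employee [' ']
  if i < 0 then ([], employee)
  else (employee.take i.toNat, employee.drop (i.toNat + 1))

-- 'name and work_hours and work_hours.isnumeric()'; isnumeric = isdigit on the ASCII domain
def pvValidate (name : List Char) (hours : List Char) : Bool :=
  !name.isEmpty && (!hours.isEmpty && PySem.Chars.strIsdigit hours)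

def get_stat_about_employees (employees : List String) : List (String × List Int) :=
  (employees.foldl (fun d employee =>
      let p := pvExtractInfo employee.toList
      if pvValidate p.1 p.2 then
        let h := (PySem.Int.ofChars? p.2).getD 0  -- int(work_hours); succeeds: validated digits
        if d.contains (String.mk p.1) then d.modify (String.mk p.1) [] (· ++ [h])
        else d.insert (String.mk p.1) [h]
      else d)
    PySem.Dict.empty).items

-- ===== PORT B =====
-- _parse: rpartition + validation in one step, none if invalid
def pvParse? (employee : String) : Option (String × Int) :=
  let cs := employee.toList
  let i := PySem.Chars.rfind cs [' ']
  let name := if i < 0 then ([] : List Char) else cs.take i.toNat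
  let hours := if i < 0 then cs else cs.drop (i.toNat + 1)
  if !name.isEmpty && (!hours.isEmpty && PySem.Chars.strIsdigit hours) then
    some (String.mk name, (PySem.Int.ofChars? hours).getD 0)
  else none

def get_stat_about_employees_alt (employees : List String) : List (String × List Int) :=
  let pairs := employees.filterMap pvParse?
  (PySem.List.dedup (pairs.map Prod.fst)).map
    (fun n => (n, (pairs.filter (fun p => p.1 == n)).map Prod.snd))

-- ===== PRECONDITION & SPEC =====
def Spec_get_stat_about_employees (employees : List String) (out : List (String × List Int)) : Prop := out = get_stat_about_employees_alt employees
instance (employees : List String) (out : List (String × List Int)) : Decidable (Spec_get_stat_about_employees employees out) := by unfold Spec_get_stat_about_employees; infer_instance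

-- ===== CLAIM (what is proved, stated in full; the proofs are below) =====
def Claim_equal_get_stat_about_employees : Prop := ∀ (employees : List String), Dom_get_stat_about_employees employees → Spec_get_stat_about_employees employees (get_stat_about_employees employees)

-- ===== LEMMAS AND PROOFS =====

-- A's loop body is exactly: parse (B-style), then append-to-group via Dict.modify.
theorem pvStep_eq (d : PySem.Dict String (List Int)) (e : String) :
    (let p := pvExtractInfo e.toList
     if pvValidate p.1 p.2 then
       let h := (PySem.Int.ofChars? p.2).getD 0
       if d.contains (String.mk p.1) then d.modify (String.mk p.1) [] (· ++ [h])
       else d.insert (String.mk p.1) [h]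
     else d)
    = (pvParse? e).elim d (fun p => d.modify p.1 [] (· ++ [p.2])) := by
  unfold pvParse? pvExtractInfo pvValidate
  by_cases hi : PySem.Chars.rfind e.toList [' '] < 0 <;>
    simp only [hi, if_true, if_false] <;>
    split_ifs <;>
    try rfl
  all_goals
    unfold PySem.Dict.modify
    simp_all [PySem.Dict.getD_of_not_contains]

-- folding over filterMap = folding over the source, skipping the none's
theorem foldl_filterMap_skip {α β γ : Type} (l : List α) (f : α → Option β)
    (g : γ → β → γ) (init : γ) :
    (l.filterMap f).foldl g init
      = l.foldl (fun acc x => (f x).elim acc (g acc)) init := by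
  induction l generalizing init with
  | nil => rfl
  | cons a t ih => cases h : f a <;> simp [h, ih]

-- ===== VERDICT (by name: the statement is the Claim_ definition above) =====
theorem get_stat_about_employees_spec : Claim_equal_get_stat_about_employees := by
  intro employees _
  unfold Spec_get_stat_about_employees get_stat_about_employees get_stat_about_employees_alt
  have hfold :
      employees.foldl (fun d employee =>
        let p := pvExtractInfo employee.toList
        if pvValidate p.1 p.2 then
          let h := (PySem.Int.ofChars? p.2).getD 0
          if d.contains (String.mk p.1) then d.modify (String.mk p.1) [] (· ++ [h])
          else d.insert (String.mk p.1) [h]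
        else d) PySem.Dict.empty
      = (employees.filterMap pvParse?).foldl
          (fun d p => d.modify p.1 [] (· ++ [p.2])) PySem.Dict.empty := by
    rw [foldl_filterMap_skip]
    refine PySem.List.foldl_congr_mem employees _ _ PySem.Dict.empty ?_
    intro d e _
    exact pvStep_eq d e
  rw [hfold]
  set pairs := employees.filterMap pvParse? with hp
  have hnd : ((pairs.foldl (fun d p => d.modify p.1 [] (· ++ [p.2])) PySem.Dict.empty).keys).Nodup := by
    exact PySem.Dict.nodup_keys_foldl_modify_key pairs Prod.fst []
      (fun d x => (· ++ [x.2])) PySem.Dict.empty PySem.Dict.nodup_keys_empty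
  rw [PySem.Dict.items_eq_map_keys _ hnd ([] : List Int)]
  have hkeys : (pairs.foldl (fun d p => d.modify p.1 [] (· ++ [p.2])) PySem.Dict.empty).keys
      = PySem.List.dedup (pairs.map Prod.fst) := by
    rw [PySem.List.dedup_eq_ofList]
    exact PySem.Dict.keys_foldl_modify_key pairs Prod.fst []
      (fun d x => (· ++ [x.2])) PySem.Dict.empty
  rw [hkeys]
  refine List.map_congr_left (fun n _ => ?_)
  have := PySem.Dict.getD_foldl_modify_append (l := pairs) (d := PySem.Dict.empty) (c := n)
  simp only [PySem.Dict.getD_empty, List.nil_append] at this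
  simp [this]
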